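-- pv_equiv track=rewrite | github.com/Eguono22/Network-Security-Monitor | network_security_monitor/storage.py | _incident_ids_from_metadata
-- ===== SOURCE A (Python) =====
-- from typing import Any
--
-- def _incident_ids_from_metadata(metadata: dict[str, Any]) -> list[str]:
--     raw = metadata.get("incident_ids", [])
--     if isinstance(raw, str):
--         raw = [raw]
--     if not isinstance(raw, list):
--         return []
--     seen: set[str] = set()
--     incident_ids: list[str] = []
--     for item in raw:
--         value = str(item).strip()
--         if not value or value in seen:
--             continue
--         seen.add(value)
--         incident_ids.append(value)
--     return incident_ids
-- ===== SOURCE B (Python) =====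
-- from typing import Any
--
-- def _incident_ids_from_metadata(metadata: dict[str, Any]) -> list[str]:
--     raw = metadata.get("incident_ids", [])
--     if isinstance(raw, str):
--         raw = [raw]
--     if not isinstance(raw, list):
--         return []
--     pending = [v for item in raw if (v := str(item).strip())]
--     incident_ids: list[str] = []
--     while pending:
--         head = pending[0]
--         incident_ids.append(head)
--         pending = [v for v in pending[1:] if v != head]
--     return incident_ids
-- ===== Notes on version B (the rewrite author's own statement) =====
-- stated objective: alternative
-- what changed: Replaces the single-pass seen-set loop by a removal-based dedup: after stripping and filtering, repeatedly take the front value, emit it, and filter every copy of it out of the remaining list, so no auxiliary seen structure exists.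
import Mathlib
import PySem

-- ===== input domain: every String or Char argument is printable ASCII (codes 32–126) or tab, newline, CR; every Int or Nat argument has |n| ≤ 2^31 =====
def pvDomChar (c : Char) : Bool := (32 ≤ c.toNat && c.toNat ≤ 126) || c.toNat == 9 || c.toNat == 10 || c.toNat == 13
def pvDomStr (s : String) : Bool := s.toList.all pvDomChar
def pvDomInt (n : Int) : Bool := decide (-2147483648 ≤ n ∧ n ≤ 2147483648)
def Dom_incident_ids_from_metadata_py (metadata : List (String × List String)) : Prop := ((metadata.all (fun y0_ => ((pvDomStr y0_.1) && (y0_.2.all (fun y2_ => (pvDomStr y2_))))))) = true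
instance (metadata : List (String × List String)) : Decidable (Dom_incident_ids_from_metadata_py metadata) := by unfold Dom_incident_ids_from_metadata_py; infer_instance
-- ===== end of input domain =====

-- B replaces A's seen-set accumulation by a removal-based dedup: strip-and-filter once,
-- then repeatedly emit the front value and filter all its copies out of the rest
-- (objective: alternative algorithm, no auxiliary seen structure).
-- Under the type convention metadata maps strings to lists of strings, so A's
-- 'isinstance(raw, str)' wrap and 'not isinstance(raw, list)' bail-out branches are
-- unreachable and carry no Lean counterpart.

-- ===== PORT A =====
-- one iteration of A's 'for item in raw:' loop over the state (seen, incident_ids)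
def pvStepA (st : PySem.Set String × List String) (item : String) : PySem.Set String × List String :=
  let value := PySem.Str.strip item
  if value = "" ∨ st.1.contains value = true then st
  else (st.1.add value, st.2 ++ [value])

def incident_ids_from_metadata_py (metadata : List (String × List String)) : List String :=
  let raw := PySem.Dict.getD ⟨metadata⟩ "incident_ids" []
  -- seen: set[str] = set(); incident_ids: list[str] = []; for item in raw: …
  let st := raw.foldl pvStepA (PySem.Set.empty, [])
  st.2

-- ===== PORT B =====
-- the 'while pending: head = pending[0]; append head; pending = [v for v in pending[1:] if v != head]' loop
def pvRemoveLoop : List String → List String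
  | [] => []
  | h :: t => h :: pvRemoveLoop (t.filter (fun v => v ≠ h))
termination_by l => l.length
decreasing_by simp; exact (List.length_filter_le _ _).trans (by simp)

def incident_ids_from_metadata_py_alt (metadata : List (String × List String)) : List String :=
  let raw := PySem.Dict.getD ⟨metadata⟩ "incident_ids" []
  -- pending = [v for item in raw if (v := str(item).strip())]
  let pending := (raw.map PySem.Str.strip).filter (fun v => v ≠ "")
  pvRemoveLoop pending

-- ===== PRECONDITION & SPEC =====
def Spec_incident_ids_from_metadata_py (metadata : List (String × List String)) (out : List String) : Prop := out = incident_ids_from_metadata_py_alt metadata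
instance (metadata : List (String × List String)) (out : List String) : Decidable (Spec_incident_ids_from_metadata_py metadata out) := by unfold Spec_incident_ids_from_metadata_py; infer_instance

-- ===== CLAIM (what is proved, stated in full; the proofs are below) =====
def Claim_equal_incident_ids_from_metadata_py : Prop := ∀ (metadata : List (String × List String)), Dom_incident_ids_from_metadata_py metadata → Spec_incident_ids_from_metadata_py metadata (incident_ids_from_metadata_py metadata)

-- ===== LEMMAS AND PROOFS =====

lemma pvRemoveLoop_nil : pvRemoveLoop [] = [] := by
  rw [pvRemoveLoop]

lemma pvRemoveLoop_cons (h : String) (t : List String) :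
    pvRemoveLoop (h :: t) = h :: pvRemoveLoop (t.filter (fun v => v ≠ h)) := by
  rw [pvRemoveLoop]

-- A's loop, started from a diagonal state (seen and emitted both s), appends exactly
-- the values B's removal loop produces from the not-yet-seen stripped values.
lemma pv_loop_eq (raw : List String) (s : List String) :
    (raw.foldl pvStepA (s, s)).2
    = s ++ pvRemoveLoop (((raw.map PySem.Str.strip).filter (fun v => v ≠ "")).filter (fun v => v ∉ s)) := by
  induction raw generalizing s with
  | nil => simp [pvRemoveLoop_nil]
  | cons a t ih =>
    rw [List.foldl_cons]
    by_cases h1 : PySem.Str.strip a = ""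
    · rw [show pvStepA (s, s) a = (s, s) by simp [pvStepA, h1]]
      simpa [h1] using ih s
    · by_cases h2 : PySem.Str.strip a ∈ s
      · rw [show pvStepA (s, s) a = (s, s) by
          simp [pvStepA, PySem.Set.contains, h2]]
        simpa [h1, h2] using ih s
      · have hcontains : PySem.Set.contains s (PySem.Str.strip a) = false := by
          simpa [PySem.Set.contains] using h2
        have hfilters :
            ((t.map PySem.Str.strip).filter (fun v => v ≠ "")).filter
              (fun v => v ∉ s ++ [PySem.Str.strip a])
            = (((t.map PySem.Str.strip).filter (fun v => v ≠ "")).filter (fun v => v ∉ s)).filter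
              (fun v => v ≠ PySem.Str.strip a) := by
          simp only [List.filter_filter]
          apply List.filter_congr
          intro x _
          by_cases hx2 : x = PySem.Str.strip a
          · subst hx2; simp [h2]
          · by_cases hx1 : x ∈ s <;> simp [hx1, hx2, List.mem_append]
        have hstep := ih (s ++ [PySem.Str.strip a])
        rw [hfilters] at hstep
        rw [show pvStepA (s, s) a
              = (s ++ [PySem.Str.strip a], s ++ [PySem.Str.strip a]) by
            simp [pvStepA, PySem.Set.add, PySem.Set.contains, h1, h2]]
        rw [hstep]
        simp [h1, h2, pvRemoveLoop_cons]

-- ===== VERDICT (by name: the statement is the Claim_ definition above) =====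
theorem incident_ids_from_metadata_py_spec : Claim_equal_incident_ids_from_metadata_py := by
  intro metadata _
  unfold Spec_incident_ids_from_metadata_py incident_ids_from_metadata_py incident_ids_from_metadata_py_alt
  simpa [PySem.Set.empty] using
    pv_loop_eq (PySem.Dict.getD ⟨metadata⟩ "incident_ids" []) []
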